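-- pv_equiv track=rewrite | github.com/rogisolorzano/Kattis | zebrasandocelots.py | ringBell
-- ===== SOURCE A (Python) =====
-- def ringBell(animals):
--     i = len(animals) - 1
--     lastOcelot = None
--     while i >= 0:
--         if animals[i] == 'O':
--             lastOcelot = i
--             animals[i] = 'Z'
--             break
--         i -= 1
--
--     if lastOcelot is not None:
--         for j in range((lastOcelot + 1),len(animals)):
--             if animals[j] == 'Z':
--                 animals[j] = 'O'
--
--     return animals
-- ===== SOURCE B (Python) =====
-- def ringBell(animals):
--     out = []
--     found = False
--     for h in reversed(animals):
--         if found: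
--             out.append(h)
--         elif h == 'O':
--             out.append('Z')
--             found = True
--         elif h == 'Z':
--             out.append('O')
--         else:
--             out.append(h)
--     if found:
--         animals[:] = out[::-1]
--     return animals
-- ===== Notes on version B (the rewrite author's own statement) =====
-- stated objective: alternative
-- what changed: B replaces A's two staged passes (a downward index search for the last 'O', then a forward flipping loop over the suffix) by one state-machine sweep over the reversed list carrying a found-flag accumulator: Z's are flipped until the first 'O' is seen, which becomes 'Z', and everything after is copied unchanged; no indices and no second pass.
import Mathlib
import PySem

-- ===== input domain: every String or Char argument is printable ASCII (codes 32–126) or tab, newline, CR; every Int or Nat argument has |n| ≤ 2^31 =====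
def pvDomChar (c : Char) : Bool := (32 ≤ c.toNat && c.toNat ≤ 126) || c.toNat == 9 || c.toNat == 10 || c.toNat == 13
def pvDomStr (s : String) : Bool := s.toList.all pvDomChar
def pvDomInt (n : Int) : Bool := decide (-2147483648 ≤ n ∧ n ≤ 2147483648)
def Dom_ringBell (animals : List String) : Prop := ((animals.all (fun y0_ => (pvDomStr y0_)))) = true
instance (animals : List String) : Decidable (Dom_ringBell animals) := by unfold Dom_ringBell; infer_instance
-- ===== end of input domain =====

-- B is a different decomposition: instead of A's two staged passes (downward index search
-- for the last 'O', then a forward flipping loop over the suffix), B makes one sweep over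
-- the reversed list with a found-flag accumulator and no index arithmetic.
-- A mutates its argument in place; the equivalence proved here is about the RETURN value only
-- (B performs the same in-place mutation in Python).

-- ===== PORT A =====
-- the 'while i >= 0' search loop: fuel n stands for i+1 (i runs n-1, n-2, …, 0)
def ringBellFind (animals : List String) : Nat → List String × Option Nat
  | 0 => (animals, none)
  | n + 1 =>
      if animals.getD n "" = "O" then (animals.set n "Z", some n)
      else ringBellFind animals n

def ringBell (animals : List String) : List String :=
  match ringBellFind animals animals.length with
  | (a, none) => a
  | (a, some i) =>
      (PySem.List.pyRange ((i : Int) + 1) (a.length : Int) 1).foldl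
        (fun acc j => if acc.getD j.toNat "" = "Z" then acc.set j.toNat "O" else acc) a

-- ===== PORT B =====
-- the loop body: state = (out, found); out is appended to, as in the Python
def ringBellStep (st : List String × Bool) (h : String) : List String × Bool :=
  if st.2 then (st.1 ++ [h], true)
  else if h = "O" then (st.1 ++ ["Z"], true)
  else if h = "Z" then (st.1 ++ ["O"], false)
  else (st.1 ++ [h], false)

def ringBell_alt (animals : List String) : List String :=
  let st := animals.reverse.foldl ringBellStep ([], false)
  if st.2 then st.1.reverse else animals

-- ===== PRECONDITION & SPEC =====
def Spec_ringBell (animals : List String) (out : List String) : Prop := out = ringBell_alt animals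
instance (animals : List String) (out : List String) : Decidable (Spec_ringBell animals out) := by unfold Spec_ringBell; infer_instance

-- ===== CLAIM (what is proved, stated in full; the proofs are below) =====
def Claim_equal_ringBell : Prop := ∀ (animals : List String), Dom_ringBell animals → Spec_ringBell animals (ringBell animals)

-- ===== LEMMAS AND PROOFS =====

def flipZ (x : String) : String := if x = "Z" then "O" else x

-- the search loop, characterised by index? on the reversed prefix
theorem ringBellFind_none (animals : List String) : ∀ (n : Nat),
    "O" ∉ animals.take n → ringBellFind animals n = (animals, none)
  | 0, _ => rfl
  | n + 1, h => by
    have h' : "O" ∉ animals.take n := fun hm => h (List.take_subset_take_left animals (by omega) hm)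
    have hg : ¬ animals.getD n "" = "O" := by
      intro he
      by_cases hlt : n < animals.length
      · rw [List.getD_eq_getElem animals "" hlt] at he
        exact h (by rw [List.take_add_one]; simp [List.getElem?_eq_getElem hlt, he])
      · rw [List.getD_eq_getElem?_getD, List.getElem?_eq_none (by omega)] at he
        simp at he
    rw [List.getD_eq_getElem?_getD] at hg
    simp [ringBellFind, hg, ringBellFind_none animals n h']

theorem ringBellFind_some (animals : List String) : ∀ (n : Nat), n ≤ animals.length → ∀ (r : Nat),
    PySem.List.index? (animals.take n).reverse "O" = some r →
    r < n ∧ ringBellFind animals n = (animals.set (n - 1 - r) "Z", some (n - 1 - r))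
  | 0, _, r, h => by simp [PySem.List.index?] at h
  | n + 1, hn, r, h => by
    have hlt : n < animals.length := by omega
    rw [List.take_add_one, List.getElem?_eq_getElem hlt] at h
    simp only [Option.toList_some, List.reverse_append, List.reverse_singleton,
      List.singleton_append] at h
    by_cases he : animals[n] = "O"
    · rw [he, PySem.List.index?_cons_self] at h
      obtain rfl : (0 : Nat) = r := Option.some_inj.mp h
      have hge : animals.getD n "" = "O" := by rw [List.getD_eq_getElem animals "" hlt]; exact he
      rw [List.getD_eq_getElem?_getD] at hge
      refine ⟨by omega, ?_⟩
      simp only [Nat.add_sub_cancel, Nat.sub_zero]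
      simp [ringBellFind, hge]
    · rw [PySem.List.index?_cons_of_ne (animals.take n).reverse he] at h
      rcases hm : PySem.List.index? (animals.take n).reverse "O" with _ | r'
      · rw [hm] at h; simp at h
      · rw [hm] at h
        simp only [Option.map_some] at h
        obtain rfl : r' + 1 = r := Option.some_inj.mp h
        obtain ⟨hr', heq⟩ := ringBellFind_some animals n (by omega) r' hm
        have hge : ¬ animals.getD n "" = "O" := by
          rw [List.getD_eq_getElem animals "" hlt]; exact he
        rw [List.getD_eq_getElem?_getD] at hge
        have hk : n + 1 - 1 - (r' + 1) = n - 1 - r' := by omega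
        refine ⟨by omega, ?_⟩
        rw [hk]
        simp [ringBellFind, hge, heq]

-- the flipping for-loop as take/drop+map
theorem fold_flip (d : Nat) : ∀ (a : List String) (m : Nat), a.length - m = d → m ≤ a.length →
    (PySem.List.pyRange (m : Int) (a.length : Int) 1).foldl
        (fun acc j => if acc.getD j.toNat "" = "Z" then acc.set j.toNat "O" else acc) a
      = a.take m ++ (a.drop m).map flipZ := by
  induction d with
  | zero =>
    intro a m hd hm
    have : m = a.length := by omega
    subst this
    rw [PySem.List.pyRange_one_eq_nil (le_refl _)]
    simp
  | succ d ih =>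
    intro a m hd hm
    have hlt : m < a.length := by omega
    have hdrop : a.drop m = a[m] :: a.drop (m + 1) := List.drop_eq_getElem_cons hlt
    rw [PySem.List.pyRange_one_cons (by exact_mod_cast hlt)]
    simp only [List.foldl_cons, Int.toNat_natCast]
    rw [List.getD_eq_getElem a "" hlt]
    by_cases hz : a[m] = "Z"
    · rw [if_pos hz]
      have hlen : (a.set m "O").length = a.length := by simp
      have hrec := ih (a.set m "O") (m + 1) (by simp; omega) (by simp; omega)
      rw [show ((m : Int) + 1) = ((m + 1 : Nat) : Int) by push_cast; ring,
          show (a.length : Int) = ((a.set m "O").length : Int) by rw [hlen],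
          hrec]
      have h1 : (a.set m "O").take (m + 1) = a.take m ++ ["O"] := by
        rw [List.take_add_one]
        simp [List.getElem?_set_self', List.getElem?_eq_getElem hlt, List.take_set,
          List.set_eq_of_length_le]
      have h2 : (a.set m "O").drop (m + 1) = a.drop (m + 1) := by rw [List.drop_set]; simp
      rw [h1, h2, hdrop]
      simp [flipZ, hz]
    · rw [if_neg hz]
      have hrec := ih a (m + 1) (by omega) (by omega)
      rw [show ((m : Int) + 1) = ((m + 1 : Nat) : Int) by push_cast; ring, hrec]
      have h1 : a.take (m + 1) = a.take m ++ [a[m]] := by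
        rw [List.take_add_one, List.getElem?_eq_getElem hlt]; rfl
      rw [h1, hdrop]
      simp only [List.map_cons, List.append_assoc, List.singleton_append, flipZ, if_neg hz]

-- B's fold once the flag is set: everything is copied unchanged
theorem fold_true (l : List String) : ∀ (acc : List String),
    l.foldl ringBellStep (acc, true) = (acc ++ l, true) := by
  induction l with
  | nil => intro acc; simp
  | cons h t ih => intro acc; simp [ringBellStep, ih, List.append_assoc]

-- B's fold while the flag is unset and no 'O' occurs: Z's flip, flag stays unset
theorem fold_false (l : List String) : ∀ (acc : List String), "O" ∉ l →
    l.foldl ringBellStep (acc, false) = (acc ++ l.map flipZ, false) := by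
  induction l with
  | nil => intro acc _; simp
  | cons h t ih =>
    intro acc hm
    have hh : h ≠ "O" := fun he => hm (he ▸ List.mem_cons_self)
    have ht : "O" ∉ t := fun he => hm (List.mem_cons_of_mem h he)
    by_cases hz : h = "Z" <;>
      simp [ringBellStep, hh, hz, ih _ ht, flipZ, List.append_assoc]

-- B's fold on a list split at its first 'O'
theorem fold_split (d e : List String) (hd : "O" ∉ d) :
    (d ++ "O" :: e).foldl ringBellStep ([], false)
      = (d.map flipZ ++ "Z" :: e, true) := by
  rw [List.foldl_append, fold_false d [] hd]
  simp only [List.nil_append, List.foldl_cons]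
  have : ringBellStep (d.map flipZ, false) "O" = (d.map flipZ ++ ["Z"], true) := by
    simp [ringBellStep]
  rw [this, fold_true]
  simp

-- ===== VERDICT (by name: the statement is the Claim_ definition above) =====
theorem ringBell_spec : Claim_equal_ringBell := by
  intro animals _
  unfold Spec_ringBell ringBell ringBell_alt
  by_cases hmem : "O" ∈ animals
  · obtain ⟨r, hr⟩ : ∃ r, PySem.List.index? animals.reverse "O" = some r :=
      Option.isSome_iff_exists.mp ((PySem.List.index?_isSome_iff animals.reverse "O").mpr (by
        rw [List.mem_reverse]; exact hmem))
    obtain ⟨d, e, hsplit, hdlen, hdo⟩ := (PySem.List.index?_eq_some_iff animals.reverse "O" r).mp hr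
    have hrlen : r < animals.length := by
      have := congrArg List.length hsplit
      simp at this
      omega
    -- A's side
    obtain ⟨-, hfind⟩ := ringBellFind_some animals animals.length (le_refl _) r
      (by rw [List.take_length]; exact hr)
    rw [hfind]
    show (PySem.List.pyRange ((↑(animals.length - 1 - r) : Int) + 1) ((animals.set (animals.length - 1 - r) "Z").length : Int) 1).foldl
        (fun acc j => if acc.getD j.toNat "" = "Z" then acc.set j.toNat "O" else acc)
        (animals.set (animals.length - 1 - r) "Z") = _
    set k := animals.length - 1 - r with hkdef
    have hk : k < animals.length := by omega
    have hfold := fold_flip ((animals.set k "Z").length - (k + 1)) (animals.set k "Z") (k + 1)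
      rfl (by simp; omega)
    rw [show ((k : Int) + 1) = ((k + 1 : Nat) : Int) by push_cast; ring, hfold]
    have h1 : (animals.set k "Z").take (k + 1) = animals.take k ++ ["Z"] := by
      rw [List.take_add_one]
      simp [List.getElem?_set_self', List.getElem?_eq_getElem hk, List.take_set,
        List.set_eq_of_length_le]
    have h2 : (animals.set k "Z").drop (k + 1) = animals.drop (k + 1) := by
      rw [List.drop_set]; simp
    rw [h1, h2]
    -- B's side
    rw [hsplit, fold_split d e hdo]
    simp only [if_pos]
    -- identify d and e with take/drop of animals
    have hd' : d = animals.reverse.take r := by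
      rw [hsplit, ← hdlen, List.take_left]
    have he' : e = animals.reverse.drop (r + 1) := by
      rw [hsplit, ← hdlen]
      rw [show d.length + 1 = (d ++ ["O"]).length by simp]
      rw [show d ++ "O" :: e = (d ++ ["O"]) ++ e by simp]
      rw [List.drop_left]
    have hdrev : d.reverse = animals.drop (k + 1) := by
      rw [hd', List.take_reverse, List.reverse_reverse, hkdef]
      congr 1
      omega
    have herev : e.reverse = animals.take k := by
      rw [he', List.drop_reverse, List.reverse_reverse, hkdef]
      congr 1
      omega
    rw [List.reverse_append, List.reverse_cons, ← List.map_reverse, hdrev, herev]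
  · rw [ringBellFind_none animals animals.length (by rw [List.take_length]; exact hmem)]
    have : "O" ∉ animals.reverse := by rw [List.mem_reverse]; exact hmem
    rw [fold_false animals.reverse [] this]
    simp
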